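-- pv_equiv track=rewrite | github.com/jainchavi/Python | Assessment2.py | signal_length
-- ===== SOURCE A (Python) =====
-- def signal_length(s):
--     max_count = 0
--     count_zero = 0
--     count_one = 0
--
--     for char in s:
--         if char == '0':
--             count_zero += 1
--             count_one = 0
--         else:
--             count_one += 1
--             count_zero = 0
--
--         max_count = max(max_count, count_zero, count_one)
--
--     return max_count
-- ===== SOURCE B (Python) =====
-- def signal_length(s):
--     best = 0
--     i = 0
--     n = len(s)
--     while i < n:
--         k = (s[i] == '0')
--         j = i + 1
--         while j < n and (s[j] == '0') == k:
--             j += 1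
--         best = max(best, j - i)
--         i = j
--     return best
-- ===== Notes on version B (the rewrite author's own statement) =====
-- stated objective: alternative
-- what changed: B segments the string into maximal runs (treating every non-'0' char alike) with an index-scanning inner loop and keeps only the best run length, instead of A's single pass maintaining two separate zero/one counters and a running three-way max; B does constant-factor fewer interpreted operations (one comparison per char in the inner scan vs counter updates plus a 3-way max per char).
import Mathlib
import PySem

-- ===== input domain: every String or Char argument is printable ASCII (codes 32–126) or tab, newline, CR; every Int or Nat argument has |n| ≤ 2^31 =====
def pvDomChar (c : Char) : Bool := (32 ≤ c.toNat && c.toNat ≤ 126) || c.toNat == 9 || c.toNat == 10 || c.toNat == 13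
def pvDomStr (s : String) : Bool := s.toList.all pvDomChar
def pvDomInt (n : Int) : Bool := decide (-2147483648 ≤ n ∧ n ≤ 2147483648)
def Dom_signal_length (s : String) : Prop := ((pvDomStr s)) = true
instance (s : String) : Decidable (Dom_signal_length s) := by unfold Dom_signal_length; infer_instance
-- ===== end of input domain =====

-- B replaces A's two running counters + running max by scanning the string run by run
-- (maximal blocks of '0's / non-'0's) and keeping the best run length; objective: alternative.

-- ===== PORT A =====
-- one step of A's for-loop: state (max_count, count_zero, count_one)
def pvStepA (st : Int × Int × Int) (c : Char) : Int × Int × Int :=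
  match st with
  | (m, z, o) =>
    if c == '0' then (max (max m (z + 1)) 0, z + 1, 0)
    else (max (max m 0) (o + 1), 0, o + 1)

def signal_length (s : String) : Int :=
  (s.toList.foldl pvStepA (0, 0, 0)).1

-- ===== PORT B =====
-- inner while loop: scan the maximal prefix whose key (c == '0') equals k;
-- returns (length of that prefix, remaining suffix) — the index pair (j - i, s[j:]) of Source B
def pvRunLen (k : Bool) : List Char → Int × List Char
  | [] => (0, [])
  | c :: t => if (c == '0') == k then ((pvRunLen k t).1 + 1, (pvRunLen k t).2) else (0, c :: t)

theorem pvRunLen_snd_length_le (k : Bool) (l : List Char) : (pvRunLen k l).2.length ≤ l.length := by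
  induction l with
  | nil => simp [pvRunLen]
  | cons c t ih =>
    simp only [pvRunLen]
    split
    · exact Nat.le_succ_of_le ih
    · simp

-- outer while loop of Source B: i < n → take the run starting at i (head plus scanned tail), update best
def pvBestLoop : List Char → Int → Int
  | [], best => best
  | c :: t, best =>
    pvBestLoop (pvRunLen (c == '0') t).2 (max best ((pvRunLen (c == '0') t).1 + 1))
termination_by l => l.length
decreasing_by
  exact Nat.lt_succ_of_le (pvRunLen_snd_length_le _ _)

def signal_length_alt (s : String) : Int :=
  pvBestLoop s.toList 0

-- ===== PRECONDITION & SPEC =====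
def Spec_signal_length (s : String) (out : Int) : Prop := out = signal_length_alt s
instance (s : String) (out : Int) : Decidable (Spec_signal_length s out) := by unfold Spec_signal_length; infer_instance

-- ===== CLAIM (what is proved, stated in full; the proofs are below) =====
def Claim_equal_signal_length : Prop := ∀ (s : String), Dom_signal_length s → Spec_signal_length s (signal_length s)

-- ===== LEMMAS AND PROOFS =====

theorem pvRunLen_fst_nonneg (k : Bool) (l : List Char) : 0 ≤ (pvRunLen k l).1 := by
  induction l with
  | nil => simp [pvRunLen]
  | cons c t ih =>
    simp only [pvRunLen]
    split
    · omega
    · simp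

-- main invariant: mid-run, A's fold state (m, ·, ·) with a current run of key k and length n
-- corresponds to B finishing that run and continuing
theorem pvMain : ∀ (t : List Char) (k : Bool) (n m : Int), 0 ≤ n → n ≤ m →
    (t.foldl pvStepA (m, (if k then n else 0), (if k then 0 else n))).1
      = pvBestLoop (pvRunLen k t).2 (max m (n + (pvRunLen k t).1)) := by
  intro t
  induction t with
  | nil =>
    intro k n m h0 h1
    simp only [List.foldl, pvRunLen, pvBestLoop]
    omega
  | cons c t ih =>
    intro k n m h0 h1
    cases k <;> cases hc : (c == '0')
    · -- k = false (non-'0' run of length n), c ≠ '0' : same run continues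
      have hp := pvRunLen_fst_nonneg false t
      have h2 := ih false (n + 1) (max (max m 0) (n + 1)) (by omega) (by omega)
      simp only [Bool.false_eq_true, if_false, List.foldl, pvStepA, hc] at h2 ⊢
      rw [h2]
      have harg : max (max (max m 0) (n + 1)) ((n + 1) + (pvRunLen false t).1)
          = max m (n + ((pvRunLen false t).1 + 1)) := by omega
      rw [harg]
      simp [pvRunLen, hc]
    · -- k = false, c = '0' : a new '0'-run starts
      have hp := pvRunLen_fst_nonneg true t
      have h2 := ih true (0 + 1) (max (max m (0 + 1)) 0) (by omega) (by omega)
      simp only [Bool.false_eq_true, if_false, if_true, List.foldl, pvStepA, hc] at h2 ⊢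
      rw [h2]
      have harg : max (max (max m (0 + 1)) 0) ((0 + 1) + (pvRunLen true t).1)
          = max (max m (n + 0)) ((pvRunLen true t).1 + 1) := by omega
      rw [harg]
      simp [pvRunLen, pvBestLoop, hc]
    · -- k = true ('0'-run of length n), c ≠ '0' : a new non-'0' run starts
      have hp := pvRunLen_fst_nonneg false t
      have h2 := ih false (0 + 1) (max (max m 0) (0 + 1)) (by omega) (by omega)
      simp only [Bool.false_eq_true, if_false, if_true, List.foldl, pvStepA, hc] at h2 ⊢
      rw [h2]
      have harg : max (max (max m 0) (0 + 1)) ((0 + 1) + (pvRunLen false t).1)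
          = max (max m (n + 0)) ((pvRunLen false t).1 + 1) := by omega
      rw [harg]
      simp [pvRunLen, pvBestLoop, hc]
    · -- k = true, c = '0' : same run continues
      have hp := pvRunLen_fst_nonneg true t
      have h2 := ih true (n + 1) (max (max m (n + 1)) 0) (by omega) (by omega)
      simp only [if_true, List.foldl, pvStepA, hc] at h2 ⊢
      rw [h2]
      have harg : max (max (max m (n + 1)) 0) ((n + 1) + (pvRunLen true t).1)
          = max m (n + ((pvRunLen true t).1 + 1)) := by omega
      rw [harg]
      simp [pvRunLen, hc]

-- ===== VERDICT (by name: the statement is the Claim_ definition above) =====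
theorem signal_length_spec : Claim_equal_signal_length := by
  intro s _
  unfold Spec_signal_length signal_length signal_length_alt
  cases hl : s.toList with
  | nil => simp [pvBestLoop]
  | cons c t =>
    have := pvMain (c :: t) (c == '0') 0 0 le_rfl le_rfl
    have hst : ((if (c == '0') then (0 : Int) else 0), (if (c == '0') then (0 : Int) else 0))
        = ((0 : Int), (0 : Int)) := by cases (c == '0') <;> rfl
    rw [hst] at this
    rw [this]
    simp only [pvRunLen, beq_self_eq_true, if_true, pvBestLoop]
    have harg : max (0 : Int) (0 + ((pvRunLen (c == '0') t).1 + 1))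
        = max 0 ((pvRunLen (c == '0') t).1 + 1) := by omega
    rw [harg]
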